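-- pv_equiv track=rewrite | github.com/InnesWarwick/scrabble_hack | build/lib/main.py | find_best_word
-- ===== SOURCE A (Python) =====
-- def find_best_word(words, max_length):
--     letter_value = {
--         'a': 1, 'b': 3, 'c': 3, 'd': 2, 'e': 1, 'f': 4, 'g': 2, 'h': 4, 'i': 1,
--         'j': 8, 'k': 5, 'l': 1, 'm': 3, 'n': 1, 'o': 1, 'p': 3, 'q': 10, 'r': 1,
--         's': 1, 't': 1, 'u': 1, 'v': 8, 'w': 4, 'x': 8, 'y': 4, 'z': 10
--     }
--     high_score = 0
--     high_word = []
--     for w in filter(lambda x: len(x) <= max_length, words):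
--         score = sum([letter_value[l] for l in w])
--         if score > high_score:
--             high_score = score
--             high_word = [w]
--         elif score == high_score:
--             high_word.append(w)
--     return high_word
-- ===== SOURCE B (Python) =====
-- def find_best_word(words, max_length):
--     vals = (1, 3, 3, 2, 1, 4, 2, 4, 1, 8, 5, 1, 3, 1, 1, 3, 10, 1, 1, 1, 1, 8, 4, 8, 4, 10)
--     score = lambda w: sum(vals[ord(c) - 97] for c in w)
--     eligible = [w for w in words if len(w) <= max_length]
--     high = max(map(score, eligible), default=0)
--     return [w for w in eligible if score(w) == high]
-- ===== Notes on version B (the rewrite author's own statement) =====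
-- stated objective: simpler
-- what changed: Replaces the single-pass running-max accumulator (beat/tie/lose branching rebuilding or appending to high_word) with two plain passes — max of all eligible-word scores (default 0), then collect the equal-scoring words — and scores by indexing a flat value table with ord(c)-97 instead of a letter dict.
import Mathlib
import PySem

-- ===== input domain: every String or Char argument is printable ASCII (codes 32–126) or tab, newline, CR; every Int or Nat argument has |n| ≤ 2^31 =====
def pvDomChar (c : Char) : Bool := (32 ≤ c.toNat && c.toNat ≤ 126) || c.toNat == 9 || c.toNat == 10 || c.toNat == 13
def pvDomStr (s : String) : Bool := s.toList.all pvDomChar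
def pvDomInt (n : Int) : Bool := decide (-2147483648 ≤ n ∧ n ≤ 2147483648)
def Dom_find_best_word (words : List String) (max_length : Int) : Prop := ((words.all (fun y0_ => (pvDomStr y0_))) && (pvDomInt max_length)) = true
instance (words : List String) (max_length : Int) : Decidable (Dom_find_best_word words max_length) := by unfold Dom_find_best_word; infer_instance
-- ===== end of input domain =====

-- B replaces A's single-pass running-max accumulator (beat/tie/lose branching on a
-- (high_score, high_word) pair) by two plain passes over the eligible words — max of all
-- scores (default 0), then collect the equal-scoring words — scoring by indexing a flat
-- value table instead of A's dict; same return value on Pre_.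

-- ===== PORT A =====
-- A's letter_value dict literal
def letterValue : PySem.Dict Char Int :=
  PySem.Dict.ofList [('a',1),('b',3),('c',3),('d',2),('e',1),('f',4),('g',2),('h',4),('i',1),
    ('j',8),('k',5),('l',1),('m',3),('n',1),('o',1),('p',3),('q',10),('r',1),
    ('s',1),('t',1),('u',1),('v',8),('w',4),('x',8),('y',4),('z',10)]

-- A's sum([letter_value[l] for l in w]); getD 0 is exact under Pre_ (KeyError inputs excluded)
def scoreA (w : String) : Int :=
  (w.toList.map (fun l => PySem.Dict.getD letterValue l 0)).sum

-- the body of A's for-loop: update (high_score, high_word) with word w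
def loopA (st : Int × List String) (w : String) : Int × List String :=
  let score := scoreA w
  if score > st.1 then (score, [w])
  else if score = st.1 then (st.1, st.2 ++ [w])
  else st

def find_best_word (words : List String) (max_length : Int) : List String :=
  let filtered := words.filter (fun x => PySem.Str.len x ≤ max_length)
  (filtered.foldl loopA ((0 : Int), ([] : List String))).2

-- ===== PORT B =====
-- B's flat tuple of values, indexed by ord(c) - 97
def letterVals : List Int := [1,3,3,2,1,4,2,4,1,8,5,1,3,1,1,3,10,1,1,1,1,8,4,8,4,10]

-- B's score: vals[ord(c) - 97]; getD 0 is exact under Pre_ (out-of-range chars excluded)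
def scoreB (w : String) : Int :=
  (w.toList.map (fun c => (PySem.List.pyGet? letterVals ((c.toNat : Int) - 97)).getD 0)).sum

def find_best_word_alt (words : List String) (max_length : Int) : List String :=
  let eligible := words.filter (fun w => PySem.Str.len w ≤ max_length)
  let high := (PySem.List.max? (eligible.map scoreB) (fun y => y)).getD 0
  eligible.filter (fun w => scoreB w = high)

-- ===== PRECONDITION & SPEC =====
-- Pre_ excludes exactly the inputs where Python A raises KeyError: a length-eligible word
-- containing a character outside 'a'..'z'.
def Pre_find_best_word (words : List String) (max_length : Int) : Prop :=
  (words.all (fun w =>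
    !(decide (PySem.Str.len w ≤ max_length)) ||
      w.toList.all (fun c => 97 ≤ c.toNat && c.toNat ≤ 122))) = true

instance (words : List String) (max_length : Int) : Decidable (Pre_find_best_word words max_length) := by
  unfold Pre_find_best_word; infer_instance

def pvWitness_find_best_word : List String × Int := (["ab"], 2)

def Spec_find_best_word (words : List String) (max_length : Int) (out : List String) : Prop := out = find_best_word_alt words max_length
instance (words : List String) (max_length : Int) (out : List String) : Decidable (Spec_find_best_word words max_length out) := by unfold Spec_find_best_word; infer_instance

-- ===== CLAIM (what is proved, stated in full; the proofs are below) =====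
def Claim_equal_find_best_word : Prop := ∀ (words : List String) (max_length : Int), Dom_find_best_word words max_length → Pre_find_best_word words max_length → Spec_find_best_word words max_length (find_best_word words max_length)

-- ===== LEMMAS AND PROOFS =====

-- on 'a'..'z' the dict lookup and the table lookup agree letter by letter
theorem char_value_eq (c : Char) (h1 : 97 ≤ c.toNat) (h2 : c.toNat ≤ 122) :
    PySem.Dict.getD letterValue c 0 = (PySem.List.pyGet? letterVals ((c.toNat : Int) - 97)).getD 0 := by
  have hc : Char.ofNat c.toNat = c := Char.ofNat_toNat c
  set n := c.toNat with hn
  clear_value n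
  interval_cases n <;> (rw [← hc]; decide)

theorem score_eq (w : String) (h : w.toList.all (fun c => 97 ≤ c.toNat && c.toNat ≤ 122) = true) :
    scoreA w = scoreB w := by
  unfold scoreA scoreB
  congr 1
  apply List.map_congr_left
  intro c hc
  simp only [List.all_eq_true] at h
  have := h c hc
  simp only [Bool.and_eq_true, decide_eq_true_eq] at this
  exact char_value_eq c this.1 this.2

theorem letterValue_getD_nonneg (c : Char) : 0 ≤ PySem.Dict.getD letterValue c 0 := by
  rw [PySem.Dict.getD_eq_get?_getD]
  cases h : letterValue.get? c with
  | none => simp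
  | some v =>
    have hm := PySem.Dict.mem_items_of_get?_eq_some letterValue h
    have hit : letterValue.items = [('a',1),('b',3),('c',3),('d',2),('e',1),('f',4),('g',2),('h',4),('i',1),
      ('j',8),('k',5),('l',1),('m',3),('n',1),('o',1),('p',3),('q',10),('r',1),
      ('s',1),('t',1),('u',1),('v',8),('w',4),('x',8),('y',4),('z',10)] := by decide
    rw [hit] at hm
    simp at hm
    rcases hm with ⟨h1,h2⟩|⟨h1,h2⟩|⟨h1,h2⟩|⟨h1,h2⟩|⟨h1,h2⟩|⟨h1,h2⟩|⟨h1,h2⟩|⟨h1,h2⟩|⟨h1,h2⟩|⟨h1,h2⟩|⟨h1,h2⟩|⟨h1,h2⟩|⟨h1,h2⟩|⟨h1,h2⟩|⟨h1,h2⟩|⟨h1,h2⟩|⟨h1,h2⟩|⟨h1,h2⟩|⟨h1,h2⟩|⟨h1,h2⟩|⟨h1,h2⟩|⟨h1,h2⟩|⟨h1,h2⟩|⟨h1,h2⟩|⟨h1,h2⟩|⟨h1,h2⟩ <;> simp [h2]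

theorem scoreA_nonneg (w : String) : 0 ≤ scoreA w := by
  unfold scoreA
  apply List.sum_nonneg
  intro x hx
  simp at hx
  obtain ⟨c, _, hc⟩ := hx
  exact hc ▸ letterValue_getD_nonneg c

-- the running max over A's scores
def runMax (l : List String) (hs : Int) : Int := l.foldl (fun m w => max m (scoreA w)) hs

theorem le_runMax (l : List String) (hs : Int) : hs ≤ runMax l hs := by
  induction l generalizing hs with
  | nil => simp [runMax]
  | cons w t ih =>
    have := ih (max hs (scoreA w))
    simp only [runMax, List.foldl_cons] at *
    exact le_trans (le_max_left _ _) this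

-- characterisation of A's accumulator loop
theorem foldA_spec (l : List String) (hs : Int) (hw : List String) :
    l.foldl loopA (hs, hw)
    = (runMax l hs,
       (if runMax l hs = hs then hw else []) ++ l.filter (fun w => scoreA w = runMax l hs)) := by
  induction l generalizing hs hw with
  | nil => simp [runMax]
  | cons w t ih =>
    have hrm : runMax (w :: t) hs = runMax t (max hs (scoreA w)) := by simp [runMax]
    rw [List.foldl_cons]
    by_cases h1 : scoreA w > hs
    · have hmax : max hs (scoreA w) = scoreA w := by omega
      have hle := le_runMax t (scoreA w)
      have hne : runMax (w :: t) hs ≠ hs := by rw [hrm, hmax]; omega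
      have hstep : loopA (hs, hw) w = (scoreA w, [w]) := by simp [loopA, h1]
      rw [hstep, ih, if_neg hne, hrm, hmax]
      set m := runMax t (scoreA w) with hm
      simp only [List.filter_cons]
      by_cases h2 : scoreA w = m
      · simp [h2]
      · have h2' : m ≠ scoreA w := fun hh => h2 hh.symm
        simp [h2, h2']
    · have hmax : max hs (scoreA w) = hs := by omega
      rw [hrm, hmax]
      set m := runMax t hs with hm
      have hle : hs ≤ m := le_runMax t hs
      by_cases h2 : scoreA w = hs
      · have hstep : loopA (hs, hw) w = (hs, hw ++ [w]) := by simp [loopA, h2]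
        rw [hstep, ih, ← hm]
        simp only [List.filter_cons]
        by_cases h3 : m = hs
        · simp [h3, h2]
        · have : ¬ (scoreA w = m) := by rw [h2]; exact fun hh => h3 hh.symm
          simp [h3, this]
      · have hlt : scoreA w < hs := by omega
        have hstep : loopA (hs, hw) w = (hs, hw) := by
          simp only [loopA]
          rw [if_neg (by omega), if_neg h2]
        rw [hstep, ih, ← hm]
        simp only [List.filter_cons]
        have : ¬ (scoreA w = m) := by omega
        simp [this]

theorem max?_eq_runMax (l : List String) :
    ((PySem.List.max? (l.map scoreA) (fun y => y)).getD 0) = runMax l 0 := by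
  cases l with
  | nil => simp [PySem.List.max?, runMax]
  | cons w t =>
    rw [List.map_cons, PySem.List.max?_id_cons]
    simp only [Option.getD_some, runMax, List.foldl_cons, List.foldl_map]
    have h0 : max 0 (scoreA w) = scoreA w := by
      have := scoreA_nonneg w; omega
    rw [h0]

-- ===== VERDICT (by name: the statement is the Claim_ definition above) =====
theorem find_best_word_spec : Claim_equal_find_best_word := by
  intro words max_length _ hpre
  unfold Spec_find_best_word find_best_word find_best_word_alt
  dsimp only
  set e := words.filter (fun x => decide (PySem.Str.len x ≤ max_length)) with he
  have helig : ∀ w ∈ e, scoreB w = scoreA w := by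
    intro w hw
    rw [he, List.mem_filter] at hw
    unfold Pre_find_best_word at hpre
    simp only [List.all_eq_true] at hpre
    have := hpre w hw.1
    simp only [hw.2, Bool.not_true, Bool.false_or] at this
    exact (score_eq w this).symm
  have hmap : e.map scoreB = e.map scoreA := List.map_congr_left helig
  rw [hmap, max?_eq_runMax]
  have hfil : e.filter (fun w => decide (scoreB w = runMax e 0))
      = e.filter (fun w => decide (scoreA w = runMax e 0)) :=
    List.filter_congr (fun w hw => by rw [helig w hw])
  rw [hfil, foldA_spec]
  split <;> simp
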